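-- pv_equiv track=rewrite | github.com/ncmadhu/coding-problems-2025 | dynamic_programming/questions_with_brainpower.py | problem_to_solve
-- ===== SOURCE A (Python) =====
-- def problem_to_solve(questions):
--     n = len(questions)
--     dp = [0] * n
--     # 1. We solve using top down approach
--     # 2. Hence initialize dp[-1] with the point of the last question
--     dp[-1] = questions[-1][0]
--     # 3. we start the loop from next question to the last
--     for i in range(n-2, -1, -1):
--         # 4. We initialize with the current questions point, assuming we are going to use it
--         dp[i] = questions[i][0]
--         skip = questions[i][1]
--         # 5. Check we have questions after the given skip count
--         if i + skip + 1 < n: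
--             # 6. Add that questions point to the current questions point
--             dp[i] += dp[i+skip+1]
--         # 7. Determine whether we use this question or skip it
--         dp[i] = max(dp[i], dp[i+1])
--     # 8. Return the last value which will be the maximum
--     return dp[0]
-- ===== SOURCE B (Python) =====
-- def problem_to_solve(questions):
--     # Forward push-DP: walk the questions once, pushing the best bank reachable
--     # at each question forward; a solve whose jump leaves the paper finishes a
--     # play, and the best finished play is the answer.
--     n = len(questions)
--     dp = [0] * n          # dp[i]: best bank with which play can reach question i
--     best = None           # best total of a finished play
--     for i, (pts, skip) in enumerate(questions):
--         if skip < 0: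
--             raise ValueError("skip count must be non-negative")
--         gain = dp[i] + pts
--         j = i + skip + 1
--         if j < n:
--             dp[j] = max(dp[j], gain)          # solve question i, resume at j
--         else:
--             best = gain if best is None else max(best, gain)
--         if i + 1 < n:
--             dp[i + 1] = max(dp[i + 1], dp[i])  # skip question i
--     return best
-- ===== Notes on version B (the rewrite author's own statement) =====
-- stated objective: alternative
-- what changed: Replaces A's backward in-place pull-DP (dp[i] built from dp[i+skip+1] right-to-left) by a forward push-DP: one left-to-right pass pushing the best reachable bank to each later question and keeping a running best over finished plays, with validation that rejects negative skip counts (outside the puzzle's domain of non-negative skips); Pre_ excludes the empty list (A raises IndexError) and lists containing a negative skip, where B's validation raises ValueError while A's value goes through Python negative-index wraparound.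
-- outside the precondition, e.g. on problem_to_solve([(5, -1)]): A returns 5, B raises ValueError
import Mathlib
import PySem

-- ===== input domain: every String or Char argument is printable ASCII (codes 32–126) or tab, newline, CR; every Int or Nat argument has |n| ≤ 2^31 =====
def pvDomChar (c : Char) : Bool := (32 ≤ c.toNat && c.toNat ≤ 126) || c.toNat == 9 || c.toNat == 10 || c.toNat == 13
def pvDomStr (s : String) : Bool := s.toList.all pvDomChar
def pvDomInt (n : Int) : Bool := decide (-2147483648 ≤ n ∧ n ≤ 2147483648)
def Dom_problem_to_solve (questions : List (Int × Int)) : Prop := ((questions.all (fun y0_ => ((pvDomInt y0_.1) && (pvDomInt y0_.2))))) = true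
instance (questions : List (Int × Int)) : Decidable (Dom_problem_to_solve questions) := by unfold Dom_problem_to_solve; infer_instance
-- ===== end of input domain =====

-- B replaces A's backward in-place pull-DP by a forward push-DP (one left-to-right pass pushing
-- the best reachable bank forward, with a running best over finished plays); objective: alternative.


-- ===== PORT A =====
def problem_to_solve (questions : List (Int × Int)) : Int :=
  let n : Int := PySem.List.len questions
  let dp : List Int := List.replicate questions.length 0
  let dp := PySem.List.pySetD dp (-1) (PySem.List.pyGetD questions (-1) (0, 0)).1
  let dp := (PySem.List.pyRange (n - 2) (-1) (-1)).foldl (fun dp i =>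
      let dp := PySem.List.pySetD dp i (PySem.List.pyGetD questions i (0, 0)).1
      let skip := (PySem.List.pyGetD questions i (0, 0)).2
      let dp := if i + skip + 1 < n then
          PySem.List.pySetD dp i
            (PySem.List.pyGetD dp i 0 + PySem.List.pyGetD dp (i + skip + 1) 0)
        else dp
      PySem.List.pySetD dp i
        (max (PySem.List.pyGetD dp i 0) (PySem.List.pyGetD dp (i + 1) 0))) dp
  PySem.List.pyGetD dp 0 0

-- ===== PORT B =====
-- the for-loop of Source B over enumerate(questions): state (dp, best), index i threaded explicitly;
-- the `raise ValueError` on a negative skip becomes `none` (that input is outside Pre_).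
def pvRunB (n : Int) : List (Int × Int) → Int → List Int → Option Int → Option Int
  | [], _, _, best => best
  | (pts, skip) :: rest, i, dp, best =>
    if skip < 0 then none   -- Python: raise ValueError (outside Pre_)
    else
      let gain := PySem.List.pyGetD dp i 0 + pts
      let j := i + skip + 1
      let dp' := if j < n then
          PySem.List.pySetD dp j (max (PySem.List.pyGetD dp j 0) gain)
        else dp
      let best' := if j < n then best
        else some (match best with | none => gain | some b => max b gain)
      let dp'' := if i + 1 < n then
          PySem.List.pySetD dp' (i + 1)
            (max (PySem.List.pyGetD dp' (i + 1) 0) (PySem.List.pyGetD dp' i 0))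
        else dp'
      pvRunB n rest (i + 1) dp'' best'

def problem_to_solve_alt (questions : List (Int × Int)) : Int :=
  let n : Int := PySem.List.len questions
  match pvRunB n questions 0 (List.replicate questions.length 0) none with
  | some b => b
  | none => 0   -- Python B: returns None on [] / raises ValueError on a negative skip; outside Pre_

-- ===== PRECONDITION & SPEC =====
-- Pre_ excludes the empty list (A raises IndexError) and lists containing a negative skip count —
-- outside the puzzle's domain of non-negative skips — where B's validation raises ValueError
-- while A still returns a value (via Python negative-index wraparound into its dp array).
def Pre_problem_to_solve (questions : List (Int × Int)) : Prop :=
  questions ≠ [] ∧ ∀ q ∈ questions, 0 ≤ q.2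
instance (questions : List (Int × Int)) : Decidable (Pre_problem_to_solve questions) := by
  unfold Pre_problem_to_solve; infer_instance

def pvWitness_problem_to_solve : (List (Int × Int)) := [(5, 1), (3, 2), (2, 0)]

def Spec_problem_to_solve (questions : List (Int × Int)) (out : Int) : Prop :=
  out = problem_to_solve_alt questions
instance (questions : List (Int × Int)) (out : Int) : Decidable (Spec_problem_to_solve questions out) := by
  unfold Spec_problem_to_solve; infer_instance

-- ===== CLAIM (what is proved, stated in full; the proofs are below) =====
def Claim_equal_problem_to_solve : Prop := ∀ (questions : List (Int × Int)), Dom_problem_to_solve questions → Pre_problem_to_solve questions → Spec_problem_to_solve questions (problem_to_solve questions)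

-- ===== LEMMAS AND PROOFS =====

-- The common value function: best points obtainable from question i onward under A's recurrence.
def pvV (questions : List (Int × Int)) (i : Nat) : Int :=
  match hq : PySem.List.pyGet? questions (i : Int) with
  | none => 0
  | some (pts, skip) =>
    let n : Int := questions.length
    if (i : Int) = n - 1 then pts
    else
      let j : Int := (i : Int) + skip + 1
      let take :=
        if j ≥ n then pts
        else
          let e : Int := if 0 ≤ j then j else n + j
          if _he : e > (i : Int) then pts + pvV questions e.toNat
          else if e = (i : Int) then pts + pts
          else pts
      max take (pvV questions (i + 1))
  termination_by questions.length - i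
  decreasing_by
  all_goals
    have hi : i < questions.length := by
      rw [PySem.List.pyGet?_natCast] at hq
      exact (List.getElem?_eq_some_iff.mp hq).1
  · have he2 : dite (0 ≤ (i:Int) + skip + 1) (fun _ => (i:Int) + skip + 1)
        (fun _ => (questions.length:Int) + ((i:Int) + skip + 1)) > (i:Int) := _he
    rcases le_or_gt (0:Int) ((i:Int) + skip + 1) with h0 | h0
    · rw [dif_pos h0] at he2 ⊢; omega
    · rw [dif_neg (by omega)] at he2 ⊢; omega
  · omega

theorem pvV_eq1 (qs : List (Int × Int)) (i : Nat)
    (pts skip : Int) (hq : PySem.List.pyGet? qs (i : Int) = some (pts, skip))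
    (hn : (i : Int) = (qs.length : Int) - 1) :
    pvV qs i = pts := by
  rw [pvV.eq_def]
  split
  · rename_i h; rw [hq] at h; cases h
  · rename_i pts' skip' h; rw [hq] at h; injection h with h; injection h with h1 h2
    subst h1; subst h2
    rw [if_pos hn]

theorem pvV_eq2 (qs : List (Int × Int)) (i : Nat)
    (pts skip : Int) (hq : PySem.List.pyGet? qs (i : Int) = some (pts, skip))
    (hn : ¬ (i : Int) = (qs.length : Int) - 1) (hj : (i : Int) + skip + 1 ≥ (qs.length : Int)) :
    pvV qs i = max pts (pvV qs (i + 1)) := by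
  rw [pvV.eq_def]
  split
  · rename_i h; rw [hq] at h; cases h
  · rename_i pts' skip' h; rw [hq] at h; injection h with h; injection h with h1 h2
    subst h1; subst h2
    simp only [if_neg hn, if_pos hj]

theorem pvV_eq3 (qs : List (Int × Int)) (i : Nat)
    (pts skip : Int) (hq : PySem.List.pyGet? qs (i : Int) = some (pts, skip))
    (hn : ¬ (i : Int) = (qs.length : Int) - 1) (hj : ¬ (i : Int) + skip + 1 ≥ (qs.length : Int))
    (he : (if 0 ≤ (i : Int) + skip + 1 then (i : Int) + skip + 1 else (qs.length : Int) + ((i : Int) + skip + 1)) > (i : Int)) :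
    pvV qs i = max (pts + pvV qs (if 0 ≤ (i : Int) + skip + 1 then (i : Int) + skip + 1 else (qs.length : Int) + ((i : Int) + skip + 1)).toNat) (pvV qs (i + 1)) := by
  rw [pvV.eq_def]
  split
  · rename_i h; rw [hq] at h; cases h
  · rename_i pts' skip' h; rw [hq] at h; injection h with h; injection h with h1 h2
    subst h1; subst h2
    simp only [if_neg hn, if_neg hj, dif_pos he]

theorem pvV_eq4 (qs : List (Int × Int)) (i : Nat)
    (pts skip : Int) (hq : PySem.List.pyGet? qs (i : Int) = some (pts, skip))
    (hn : ¬ (i : Int) = (qs.length : Int) - 1) (hj : ¬ (i : Int) + skip + 1 ≥ (qs.length : Int))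
    (he : ¬ (if 0 ≤ (i : Int) + skip + 1 then (i : Int) + skip + 1 else (qs.length : Int) + ((i : Int) + skip + 1)) > (i : Int)) :
    pvV qs i = max (if (if 0 ≤ (i : Int) + skip + 1 then (i : Int) + skip + 1 else (qs.length : Int) + ((i : Int) + skip + 1)) = (i : Int) then pts + pts else pts) (pvV qs (i + 1)) := by
  rw [pvV.eq_def]
  split
  · rename_i h; rw [hq] at h; cases h
  · rename_i pts' skip' h; rw [hq] at h; injection h with h; injection h with h1 h2
    subst h1; subst h2
    simp only [if_neg hn, if_neg hj, dif_neg he]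

-- ---------- A's loop computes pvV ----------

theorem pvGetD_wrap (xs : List Int) (j : Int) (hlo : -(xs.length : Int) ≤ j)
    (hhi : j < (xs.length : Int)) :
    PySem.List.pyGetD xs j 0 =
      xs.getD (if 0 ≤ j then j.toNat else ((xs.length : Int) + j).toNat) 0 := by
  rcases le_or_gt 0 j with h0 | h0
  · rw [if_pos h0, PySem.List.pyGetD_eq_getElem xs 0 h0 (by omega)]
    rw [List.getD_eq_getElem xs 0 (by omega)]
  · rw [if_neg (by omega)]
    have hj : j = -(((-j).toNat : Nat) : Int) := by omega
    rw [hj, PySem.List.pyGetD_neg_natCast xs (-j).toNat 0 (by omega) (by omega)]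
    rw [List.getD_eq_getElem xs 0 (by omega)]
    congr 1
    omega

theorem pvGetD_set_eq (xs : List Int) (m k : Nat) (v : Int) :
    (xs.set m v).getD k 0 = if k = m ∧ m < xs.length then v else xs.getD k 0 := by
  simp only [List.getD_eq_getElem?_getD, List.getElem?_set]
  split_ifs with h1 h2 h3 h4 <;> simp_all

def pvStep (qs : List (Int × Int)) (dp : List Int) (i : Int) : List Int :=
  let n : Int := PySem.List.len qs
  let dp := PySem.List.pySetD dp i (PySem.List.pyGetD qs i (0, 0)).1
  let skip := (PySem.List.pyGetD qs i (0, 0)).2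
  let dp := if i + skip + 1 < n then
      PySem.List.pySetD dp i
        (PySem.List.pyGetD dp i 0 + PySem.List.pyGetD dp (i + skip + 1) 0)
    else dp
  PySem.List.pySetD dp i
    (max (PySem.List.pyGetD dp i 0) (PySem.List.pyGetD dp (i + 1) 0))

def pvInv (qs : List (Int × Int)) (i : Nat) (dp : List Int) : Prop :=
  dp.length = qs.length ∧ ∀ k : Nat, k < qs.length →
    (k < i → dp.getD k 0 = 0) ∧ (i ≤ k → dp.getD k 0 = pvV qs k)

theorem pvStep_inv (qs : List (Int × Int)) (hnn : ∀ q ∈ qs, 0 ≤ q.2) (i : Nat)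
    (hi : i + 1 < qs.length) (dp : List Int) (h : pvInv qs (i + 1) dp) :
    pvInv qs i (pvStep qs dp (i : Int)) := by
  obtain ⟨hlen, hk⟩ := h
  have hin : i < qs.length := by omega
  have hq : PySem.List.pyGet? qs (i : Int) = some qs[i] := PySem.List.pyGet?_ofNat qs i hin
  have hgq : PySem.List.pyGetD qs (i : Int) (0, 0) = qs[i] := PySem.List.pyGetD_ofNat qs i (0, 0) hin
  have hsk : 0 ≤ qs[i].2 := hnn _ (List.getElem_mem hin)
  have hpe : -(qs.length : Int) ≤ (i : Int) + qs[i].2 + 1 := by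
    have : (0:Int) ≤ (i : Int) := Int.natCast_nonneg i
    omega
  have hilen : i < dp.length := by omega
  have hnn' : ¬ ((i : Int) = (qs.length : Int) - 1) := by omega
  -- reduce pvStep to a single set at index i
  have hstep : pvStep qs dp (i : Int) = dp.set i (pvV qs i) := by
    have hcast1 : ((i : Int) + 1) = (((i + 1 : Nat)) : Int) := by push_cast; ring
    by_cases hc : (i : Int) + qs[i].2 + 1 < (qs.length : Int)
    · -- solve-branch is read
      simp only [pvStep, PySem.List.len_eq, hgq, PySem.List.pySetD_natCast, if_pos hc]
      rw [hcast1]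
      simp only [PySem.List.pyGetD_natCast]
      have hA : (dp.set i qs[i].1).getD i 0 = qs[i].1 := by
        rw [pvGetD_set_eq, if_pos ⟨rfl, hilen⟩]
      rw [hA]
      have hwrap : PySem.List.pyGetD (dp.set i qs[i].1) ((i : Int) + qs[i].2 + 1) 0 =
          (dp.set i qs[i].1).getD
            ((if 0 ≤ (i : Int) + qs[i].2 + 1 then (i : Int) + qs[i].2 + 1
              else (qs.length : Int) + ((i : Int) + qs[i].2 + 1))).toNat 0 := by
        rw [pvGetD_wrap _ _ (by simp [hlen]; omega) (by simp [hlen]; omega)]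
        congr 1
        by_cases h0 : 0 ≤ (i : Int) + qs[i].2 + 1
        · simp [h0]
        · simp [h0, hlen]
      rw [hwrap]
      set eI : Int := (if 0 ≤ (i : Int) + qs[i].2 + 1 then (i : Int) + qs[i].2 + 1
          else (qs.length : Int) + ((i : Int) + qs[i].2 + 1)) with heI
      have he0 : 0 ≤ eI := by rw [heI]; split <;> omega
      have heN : eI < (qs.length : Int) := by rw [heI]; split <;> omega
      set X : Int := (dp.set i qs[i].1).getD eI.toNat 0 with hX
      have hY : ((dp.set i qs[i].1).set i (qs[i].1 + X)).getD i 0 = qs[i].1 + X := by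
        rw [pvGetD_set_eq, if_pos ⟨rfl, by simpa using hilen⟩]
      have hZ : ((dp.set i qs[i].1).set i (qs[i].1 + X)).getD (i + 1) 0 = pvV qs (i + 1) := by
        rw [pvGetD_set_eq, if_neg (by omega), pvGetD_set_eq, if_neg (by omega)]
        exact (hk (i + 1) hi).2 (le_refl _)
      rw [hY, hZ, List.set_set, List.set_set]
      congr 1
      rcases lt_trichotomy i eI.toNat with ht | ht | ht
      · have hXv : X = pvV qs eI.toNat := by
          rw [hX, pvGetD_set_eq, if_neg (by omega)]
          exact (hk eI.toNat (by omega)).2 (by omega)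
        rw [hXv, pvV_eq3 qs i qs[i].1 qs[i].2 hq hnn' (by omega) (by rw [← heI]; omega)]
      · have hXv : X = qs[i].1 := by
          rw [hX, pvGetD_set_eq, if_pos ⟨by omega, hilen⟩]
        rw [hXv, pvV_eq4 qs i qs[i].1 qs[i].2 hq hnn' (by omega) (by rw [← heI]; omega)]
        rw [← heI, if_pos (show eI = (i : Int) by omega)]
      · have hXv : X = 0 := by
          rw [hX, pvGetD_set_eq, if_neg (by omega)]
          exact (hk eI.toNat (by omega)).1 (by omega)
        rw [hXv, pvV_eq4 qs i qs[i].1 qs[i].2 hq hnn' (by omega) (by rw [← heI]; omega)]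
        rw [← heI, if_neg (show ¬ eI = (i : Int) by omega), add_zero]
    · -- no read
      simp only [pvStep, PySem.List.len_eq, hgq, PySem.List.pySetD_natCast, if_neg hc]
      rw [hcast1]
      simp only [PySem.List.pyGetD_natCast]
      rw [List.set_set]
      congr 1
      rw [pvGetD_set_eq, pvGetD_set_eq]
      rw [if_pos ⟨rfl, hilen⟩, if_neg (by omega)]
      rw [pvV_eq2 qs i qs[i].1 qs[i].2 hq hnn' (by omega)]
      have h2 := (hk (i + 1) hi).2 (le_refl _)
      rw [h2]
  have hlen2 : (dp.set i (pvV qs i)).length = qs.length := by simp [hlen]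
  refine ⟨by rw [hstep]; exact hlen2, ?_⟩
  intro k hk'
  rw [hstep]
  constructor
  · intro hki
    rw [pvGetD_set_eq, if_neg (by omega)]
    exact (hk k hk').1 (by omega)
  · intro hki
    rw [pvGetD_set_eq]
    by_cases hke : k = i
    · subst hke; rw [if_pos ⟨rfl, hilen⟩]
    · rw [if_neg (by simp [hke])]
      exact (hk k hk').2 (by omega)

theorem pvLoop_inv (qs : List (Int × Int)) (hnn : ∀ q ∈ qs, 0 ≤ q.2) :
    ∀ (i : Nat), i + 1 < qs.length → ∀ dp, pvInv qs (i + 1) dp →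
      pvInv qs 0 ((PySem.List.pyRange (i : Int) (-1) (-1)).foldl (fun dp x => pvStep qs dp x) dp) := by
  intro i
  induction i with
  | zero =>
    intro hi dp hinv
    rw [PySem.List.pyRange_neg_one_cons (by omega)]
    rw [show ((0:Nat):Int) - 1 = -1 by omega]
    rw [PySem.List.pyRange_neg_one_eq_nil (by omega)]
    simp only [List.foldl_cons, List.foldl_nil]
    have := pvStep_inv qs hnn 0 hi dp hinv
    simpa using this
  | succ i ih =>
    intro hi dp hinv
    rw [PySem.List.pyRange_neg_one_cons (by omega)]
    rw [show (((i+1:Nat)):Int) - 1 = ((i:Nat):Int) by push_cast; ring]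
    simp only [List.foldl_cons]
    exact ih (by omega) _ (pvStep_inv qs hnn (i + 1) hi dp hinv)

theorem a_eq_pvV (qs : List (Int × Int)) (hne : qs ≠ []) (hnn : ∀ q ∈ qs, 0 ≤ q.2) :
    problem_to_solve qs = pvV qs 0 := by
  have hn1 : 1 ≤ qs.length := by
    cases qs with
    | nil => exact absurd rfl hne
    | cons a l => simp
  show PySem.List.pyGetD
      ((PySem.List.pyRange ((qs.length : Int) - 2) (-1) (-1)).foldl
        (fun dp x => pvStep qs dp x)
        (PySem.List.pySetD (List.replicate qs.length 0) (-1)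
          (PySem.List.pyGetD qs (-1) (0, 0)).1)) 0 0 = pvV qs 0
  have hlast : (PySem.List.pyGetD qs (-1) (0, 0)).1 = qs[qs.length - 1].1 := by
    rw [PySem.List.pyGetD_neg_one qs (0, 0) hne, List.getLast_eq_getElem]
  have hsetneg : PySem.List.pySetD (List.replicate qs.length 0) (-1)
      (PySem.List.pyGetD qs (-1) (0, 0)).1 =
      (List.replicate qs.length 0).set (qs.length - 1) qs[qs.length - 1].1 := by
    rw [hlast]
    simp only [PySem.List.pySetD, PySem.List.pySet?, PySem.List.pyIdx?]
    rw [if_neg (by omega), if_pos (by simp; omega)]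
    simp
  rw [hsetneg]
  have hInit : pvInv qs (qs.length - 1)
      ((List.replicate qs.length 0).set (qs.length - 1) qs[qs.length - 1].1) := by
    constructor
    · simp
    · intro k hk
      constructor
      · intro hklt
        rw [pvGetD_set_eq, if_neg (by omega)]
        simp [List.getD_eq_getElem?_getD, hk]
      · intro hkge
        have hkeq : k = qs.length - 1 := by omega
        subst hkeq
        rw [pvGetD_set_eq, if_pos ⟨rfl, by simp; omega⟩]
        rw [pvV_eq1 qs (qs.length - 1) qs[qs.length - 1].1 qs[qs.length - 1].2
          (by rw [PySem.List.pyGet?_ofNat qs (qs.length - 1) (by omega)])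
          (by omega)]
  rcases Nat.lt_or_ge qs.length 2 with h2 | h2
  · have hq1 : qs.length = 1 := by omega
    rw [PySem.List.pyRange_neg_one_eq_nil (by omega)]
    simp only [List.foldl_nil]
    rw [PySem.List.pyGetD_zero, (hInit.2 0 (by omega)).2 (by omega)]
  · have hcast : (qs.length : Int) - 2 = ((qs.length - 2 : Nat) : Int) := by omega
    rw [hcast]
    have hloop := pvLoop_inv qs hnn (qs.length - 2) (by omega) _
      (by rw [show qs.length - 2 + 1 = qs.length - 1 by omega]; exact hInit)
    rw [PySem.List.pyGetD_zero, (hloop.2 0 (by omega)).2 (by omega)]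

-- ---------- B's forward push-loop computes pvV 0 ----------

-- max of an optional finished-play value with an optional range maximum
def pvOMax (b : Option Int) (m : Option Int) : Option Int :=
  match b, m with
  | none, m => m
  | some b, none => some b
  | some b, some m => some (max b m)

theorem pvOMax_finish (best : Option Int) (g M R : Int) (h : max g M = R) :
    pvOMax (some (match best with | none => g | some b => max b g)) (some M) = pvOMax best (some R) := by
  cases best with
  | none => simp [pvOMax, h]
  | some b => simp [pvOMax, ← h, max_assoc]

-- max over m ∈ [i, n) of dp[m] + pvV m
def pvRM (qs : List (Int × Int)) (dp : List Int) (i : Nat) : Option Int :=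
  if _h : i < qs.length then
    match pvRM qs dp (i + 1) with
    | none => some (dp.getD i 0 + pvV qs i)
    | some m => some (max (dp.getD i 0 + pvV qs i) m)
  else none
  termination_by qs.length - i

theorem pvRM_none (qs : List (Int × Int)) (dp : List Int) (i : Nat) (h : ¬ i < qs.length) :
    pvRM qs dp i = none := by
  rw [pvRM]; rw [dif_neg h]

theorem pvRM_isSome (qs : List (Int × Int)) (dp : List Int) (i : Nat) (h : i < qs.length) :
    ∃ m, pvRM qs dp i = some m := by
  rw [pvRM, dif_pos h]
  cases pvRM qs dp (i + 1) <;> exact ⟨_, rfl⟩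

theorem pvRM_congr (qs : List (Int × Int)) (dp1 dp2 : List Int) (i : Nat)
    (h : ∀ m, i ≤ m → m < qs.length → dp1.getD m 0 = dp2.getD m 0) :
    pvRM qs dp1 i = pvRM qs dp2 i := by
  have key : ∀ k i, qs.length - i ≤ k →
      (∀ m, i ≤ m → m < qs.length → dp1.getD m 0 = dp2.getD m 0) →
      pvRM qs dp1 i = pvRM qs dp2 i := by
    intro k
    induction k with
    | zero =>
      intro i hk _
      rw [pvRM_none qs dp1 i (by omega), pvRM_none qs dp2 i (by omega)]
    | succ k ih =>
      intro i hk h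
      by_cases hi : i < qs.length
      · rw [pvRM, dif_pos hi]
        rw [ih (i + 1) (by omega) (fun m h1 h2 => h m (by omega) h2),
          h i (le_refl i) hi]
        conv_rhs => rw [pvRM]
        rw [dif_pos hi]
      · rw [pvRM_none qs dp1 i hi, pvRM_none qs dp2 i hi]
  exact key (qs.length - i) i (le_refl _) h

-- pushing to cell j (i ≤ j < n) with max(dp[j], g) raises the range max by g + pvV j
theorem pvRM_set (qs : List (Int × Int)) (dp : List Int) (i j : Nat) (g m : Int)
    (hij : i ≤ j) (hjn : j < qs.length) (hlen : dp.length = qs.length)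
    (hm : pvRM qs dp i = some m) :
    pvRM qs (dp.set j (max (dp.getD j 0) g)) i = some (max m (g + pvV qs j)) := by
  have hbase : ∀ m, pvRM qs dp j = some m →
      pvRM qs (dp.set j (max (dp.getD j 0) g)) j = some (max m (g + pvV qs j)) := by
    intro m hm
    · rw [pvRM, dif_pos hjn] at hm ⊢
      have htail : pvRM qs (dp.set j (max (dp.getD j 0) g)) (j + 1) = pvRM qs dp (j + 1) := by
        apply pvRM_congr
        intro m' h1 h2
        rw [pvGetD_set_eq, if_neg (by omega)]
      rw [htail]
      have hhead : (dp.set j (max (dp.getD j 0) g)).getD j 0 = max (dp.getD j 0) g := by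
        rw [pvGetD_set_eq, if_pos ⟨rfl, by omega⟩]
      rw [hhead]
      cases htl : pvRM qs dp (j + 1) with
      | none =>
        rw [htl] at hm
        injection hm with hm
        subst hm
        show some (max (dp.getD j 0) g + pvV qs j) =
          some (max (dp.getD j 0 + pvV qs j) (g + pvV qs j))
        rw [max_add_add_right]
      | some t =>
        rw [htl] at hm
        injection hm with hm
        subst hm
        show some (max (max (dp.getD j 0) g + pvV qs j) t) =
          some (max (max (dp.getD j 0 + pvV qs j) t) (g + pvV qs j))
        rw [← max_add_add_right]
        congr 1
        ac_rfl
  have key : ∀ k i m, j - i ≤ k → i ≤ j → pvRM qs dp i = some m →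
      pvRM qs (dp.set j (max (dp.getD j 0) g)) i = some (max m (g + pvV qs j)) := by
    intro k
    induction k with
    | zero =>
      intro i m hk hij hm
      have hij' : i = j := by omega
      subst hij'
      exact hbase m hm
    | succ k ih =>
      intro i m hk hij hm
      by_cases hij' : i = j
      · subst hij'
        exact hbase m hm
      · have hi : i < qs.length := by omega
        rw [pvRM, dif_pos hi] at hm ⊢
        obtain ⟨t, htl⟩ := pvRM_isSome qs dp (i + 1) (by omega)
        rw [htl] at hm
        rw [ih (i + 1) t (by omega) (by omega) htl]
        have hhead : (dp.set j (max (dp.getD j 0) g)).getD i 0 = dp.getD i 0 := by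
          rw [pvGetD_set_eq, if_neg (by omega)]
        rw [hhead]
        injection hm with hm
        subst hm
        show some (max (dp.getD i 0 + pvV qs i) (max t (g + pvV qs j))) =
          some (max (max (dp.getD i 0 + pvV qs i) t) (g + pvV qs j))
        congr 1
        ac_rfl
  exact key (j - i) i m (le_refl _) hij hm

-- on the all-zero dp the range max from i is pvV i (pvV is antitone)
theorem pvV_antitone (qs : List (Int × Int)) (i : Nat) (hi : i + 1 < qs.length) :
    pvV qs (i + 1) ≤ pvV qs i := by
  have hin : i < qs.length := by omega
  have hq : PySem.List.pyGet? qs (i : Int) = some qs[i] := PySem.List.pyGet?_ofNat qs i hin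
  have hn : ¬ ((i : Int) = (qs.length : Int) - 1) := by omega
  by_cases hj : (i : Int) + qs[i].2 + 1 ≥ (qs.length : Int)
  · rw [pvV_eq2 qs i qs[i].1 qs[i].2 hq hn hj]; exact le_max_right _ _
  · by_cases he : (if 0 ≤ (i : Int) + qs[i].2 + 1 then (i : Int) + qs[i].2 + 1
        else (qs.length : Int) + ((i : Int) + qs[i].2 + 1)) > (i : Int)
    · rw [pvV_eq3 qs i qs[i].1 qs[i].2 hq hn hj he]; exact le_max_right _ _
    · rw [pvV_eq4 qs i qs[i].1 qs[i].2 hq hn hj he]; exact le_max_right _ _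

theorem pvGetD_replicate (n i : Nat) : (List.replicate n (0:Int)).getD i 0 = 0 := by
  simp [List.getD_eq_getElem?_getD, List.getElem?_replicate]
  split <;> simp

theorem pvRM_zero (qs : List (Int × Int)) (i : Nat) (hi : i < qs.length) :
    pvRM qs (List.replicate qs.length 0) i = some (pvV qs i) := by
  have key : ∀ k i, qs.length - i ≤ k → i < qs.length →
      pvRM qs (List.replicate qs.length 0) i = some (pvV qs i) := by
    intro k
    induction k with
    | zero => intro i hk hi; omega
    | succ k ih =>
      intro i hk hi
      rw [pvRM, dif_pos hi, pvGetD_replicate, zero_add]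
      by_cases hi1 : i + 1 < qs.length
      · rw [ih (i + 1) (by omega) hi1]
        show some (max (pvV qs i) (pvV qs (i + 1))) = some (pvV qs i)
        rw [max_eq_left (pvV_antitone qs i hi1)]
      · rw [pvRM_none qs _ (i + 1) hi1]
  exact key (qs.length - i) i (le_refl _) hi

theorem pvRunB_inv (qs : List (Int × Int)) (hnn : ∀ q ∈ qs, 0 ≤ q.2) :
    ∀ (rest : List (Int × Int)) (i : Nat) (dp : List Int) (best : Option Int),
      rest = qs.drop i → dp.length = qs.length →
      pvRunB (qs.length : Int) rest (i : Int) dp best = pvOMax best (pvRM qs dp i) := by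
  intro rest
  induction rest with
  | nil =>
    intro i dp best hdrop hlen
    have hin : qs.length ≤ i := by
      have := congrArg List.length hdrop
      simp [List.length_drop] at this
      omega
    rw [pvRunB, pvRM_none qs dp i (by omega)]
    cases best <;> rfl
  | cons hd rest' ih =>
    intro i dp best hdrop hlen
    obtain ⟨pts, skip⟩ := hd
    have hi : i < qs.length := by
      by_contra hcon
      rw [List.drop_eq_nil_of_le (by omega)] at hdrop
      exact absurd hdrop (List.cons_ne_nil _ _)
    have hdrop2 := List.drop_eq_getElem_cons hi
    rw [← hdrop] at hdrop2
    injection hdrop2 with h1 h2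
    have hqi : qs[i] = (pts, skip) := h1.symm
    have hrest' : rest' = qs.drop (i + 1) := h2
    have hsk : 0 ≤ skip := by
      have := hnn qs[i] (List.getElem_mem hi)
      rw [hqi] at this
      exact this
    have hq : PySem.List.pyGet? qs (i : Int) = some (pts, skip) := by
      rw [PySem.List.pyGet?_ofNat qs i hi, hqi]
    rw [pvRunB, if_neg (by omega)]
    simp only [PySem.List.pyGetD_natCast]
    set gain := dp.getD i 0 + pts with hgain
    have hcast1 : ((i : Int) + 1) = (((i + 1 : Nat)) : Int) := by push_cast; ring
    by_cases hjlt : (i : Int) + skip + 1 < (qs.length : Int)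
    · -- solve lands on a later question jn
      set jn : Nat := ((i : Int) + skip + 1).toNat with hjn
      have hjeq : (i : Int) + skip + 1 = (jn : Int) := by omega
      have hijn : i + 1 ≤ jn := by omega
      have hjnlen : jn < qs.length := by omega
      have hi1 : i + 1 < qs.length := by omega
      rw [if_pos hjlt, if_pos hjlt, if_pos (by omega : (i : Int) + 1 < (qs.length : Int))]
      rw [hjeq, PySem.List.pySetD_natCast, PySem.List.pyGetD_natCast]
      set dp' := dp.set jn (max (dp.getD jn 0) gain) with hdp'
      rw [hcast1]
      simp only [PySem.List.pySetD_natCast, PySem.List.pyGetD_natCast]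
      have hdpi : dp'.getD i 0 = dp.getD i 0 := by
        rw [hdp', pvGetD_set_eq, if_neg (by omega)]
      rw [hdpi]
      set dp'' := dp'.set (i + 1) (max (dp'.getD (i + 1) 0) (dp.getD i 0)) with hdp''
      rw [ih (i + 1) dp'' best hrest' (by simp [hdp'', hdp', hlen])]
      obtain ⟨m, hmm⟩ := pvRM_isSome qs dp (i + 1) hi1
      have step1 : pvRM qs dp' (i + 1) = some (max m (gain + pvV qs jn)) :=
        pvRM_set qs dp (i + 1) jn gain m hijn hjnlen hlen hmm
      have step2 : pvRM qs dp'' (i + 1) =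
          some (max (max m (gain + pvV qs jn)) (dp.getD i 0 + pvV qs (i + 1))) :=
        pvRM_set qs dp' (i + 1) (i + 1) (dp.getD i 0) _ (le_refl _) hi1
          (by simp [hdp', hlen]) step1
      rw [step2]
      conv_rhs => rw [pvRM, dif_pos hi, hmm]
      have hpv : pvV qs i = max (pts + pvV qs jn) (pvV qs (i + 1)) := by
        have h0 : (0:Int) ≤ (i : Int) + skip + 1 := by omega
        have := pvV_eq3 qs i pts skip hq (by omega) (by omega)
          (by rw [if_pos h0]; omega)
        rw [if_pos h0] at this
        rw [this, hjeq]
        simp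
      show pvOMax best (some (max (max m (gain + pvV qs jn)) (dp.getD i 0 + pvV qs (i + 1)))) =
        pvOMax best (some (max (dp.getD i 0 + pvV qs i) m))
      congr 2
      rw [hpv, ← max_add_add_left, hgain, add_assoc]
      simp [max_comm, max_left_comm]
    · -- solve finishes the play
      rw [if_neg hjlt, if_neg hjlt]
      set best' := some (match best with | none => gain | some b => max b gain) with hbest'
      by_cases hi1 : i + 1 < qs.length
      · rw [if_pos (by omega : (i : Int) + 1 < (qs.length : Int))]
        rw [hcast1]
        simp only [PySem.List.pySetD_natCast, PySem.List.pyGetD_natCast]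
        set dp'' := dp.set (i + 1) (max (dp.getD (i + 1) 0) (dp.getD i 0)) with hdp''
        rw [ih (i + 1) dp'' best' hrest' (by simp [hdp'', hlen])]
        obtain ⟨m, hmm⟩ := pvRM_isSome qs dp (i + 1) hi1
        have step : pvRM qs dp'' (i + 1) =
            some (max m (dp.getD i 0 + pvV qs (i + 1))) :=
          pvRM_set qs dp (i + 1) (i + 1) (dp.getD i 0) m (le_refl _) hi1 hlen hmm
        rw [step, hbest']
        have hpv : pvV qs i = max pts (pvV qs (i + 1)) :=
          pvV_eq2 qs i pts skip hq (by omega) (by omega)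
        have inner : max gain (max m (dp.getD i 0 + pvV qs (i + 1))) =
            max (dp.getD i 0 + pvV qs i) m := by
          rw [hpv, ← max_add_add_left, hgain]
          ac_rfl
        have hrm : pvRM qs dp i = some (max (dp.getD i 0 + pvV qs i) m) := by
          rw [pvRM, dif_pos hi, hmm]
        rw [hrm]
        exact pvOMax_finish best gain _ _ inner
      · -- last question
        have hieq : i + 1 = qs.length := by omega
        have hrestnil : rest' = [] := by
          rw [hrest', hieq, List.drop_length]
        rw [if_neg (by omega : ¬ (i : Int) + 1 < (qs.length : Int))]
        rw [hrestnil, pvRunB]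
        conv_rhs => rw [pvRM, dif_pos hi, pvRM_none qs dp (i + 1) (by omega)]
        have hpv : pvV qs i = pts := pvV_eq1 qs i pts skip hq (by omega)
        rw [hbest', hpv]
        cases best <;> rfl

theorem alt_eq_pvV (qs : List (Int × Int)) (hne : qs ≠ []) (hnn : ∀ q ∈ qs, 0 ≤ q.2) :
    problem_to_solve_alt qs = pvV qs 0 := by
  have h0 : 0 < qs.length := List.length_pos_iff.mpr hne
  show (match pvRunB (PySem.List.len qs) qs 0 (List.replicate qs.length 0) none with
    | some b => b
    | none => (0:Int)) = pvV qs 0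
  rw [PySem.List.len_eq]
  have hinv := pvRunB_inv qs hnn qs 0 (List.replicate qs.length 0) none rfl (by simp)
  simp only [Nat.cast_zero] at hinv
  rw [hinv, pvRM_zero qs 0 h0]
  rfl

-- ===== VERDICT (by name: the statement is the Claim_ definition above) =====
theorem problem_to_solve_spec : Claim_equal_problem_to_solve := by
  intro questions _ hpre
  unfold Spec_problem_to_solve
  rw [a_eq_pvV questions hpre.1 hpre.2, alt_eq_pvV questions hpre.1 hpre.2]
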